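-- pv_equiv track=rewrite | github.com/namhn89/algorithm | codelearn/23366/23366.py | equalitree
-- ===== SOURCE A (Python) =====
-- inf = 10**9
--
-- def equalitree(parents, values):
--     children = [[] for _ in range(len(parents))]
--     for i in range(1, len(parents)):
--         children[parents[i]] += [i]
--
--     memo = {}
--     def tf(r):
--         if r not in memo:
--             if not children[r]:
--                 memo[r] = (0, 1) if values[r] else (1, 0)
--             elif len(children[r]) == 1:
--                 memo[r] = 1 - values[r] + min(tf(children[r][0])), inf
--             else:
--                 ct, cf = zip(*[tf(c) for c in children[r]])
--                 t = min(sum(ct), sum(cf)) + 1 - values[r]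
--                 f = values[r]
--                 mch = inf
--                 fl = 0
--                 for tt, ff in (tf(c) for c in children[r]):
--                     if tt < ff:
--                         f += tt
--                         fl |= 1
--                     elif ff < tt:
--                         f += ff
--                         fl |= 2
--                     else:
--                         f += ff
--                         fl |= 3
--                     mch = min(mch, abs(tt - ff))
--                 if fl != 3:
--                     f += mch
--                 memo[r] = t, f
--         return memo[r]
--
--     return min(tf(0))
-- ===== SOURCE B (Python) =====
-- inf = 10**9
--
-- def _node(v, kids):
--     # kids = list of (t, f) pairs of the children, in child order
--     if not kids:
--         return (0, 1) if v else (1, 0)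
--     if len(kids) == 1:
--         return 1 - v + min(kids[0]), inf
--     t = min(sum(tt for tt, _ in kids), sum(ff for _, ff in kids)) + 1 - v
--     f = v + sum(min(tt, ff) for tt, ff in kids)
--     if not (any(tt == ff for tt, ff in kids)
--             or (any(tt < ff for tt, ff in kids)
--                 and any(ff < tt for tt, ff in kids))):
--         f += min([inf] + [abs(tt - ff) for tt, ff in kids])
--     return t, f
--
-- def equalitree(parents, values):
--     n = len(parents)
--     children = [[] for _ in range(n)]
--     for i in range(1, n):
--         children[parents[i]].append(i)
--     # iterative BFS from the root: a topological order of the reachable nodes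
--     order = [0]
--     i = 0
--     while i < len(order):
--         order.extend(children[order[i]])
--         i += 1
--     # fill the dp table bottom-up (children before parents)
--     dp = [(0, 0)] * n
--     for r in reversed(order):
--         dp[r] = _node(values[r], [dp[c] for c in children[r]])
--     return min(dp[0])
-- ===== Notes on version B (the rewrite author's own statement) =====
-- stated objective: alternative
-- what changed: Replaces A's memoized recursive tf (nested closure + memo dict + zip/bitmask-fl loop) by an explicit iterative traversal: a BFS from the root produces a topological order of the reachable nodes, a dp table is filled bottom-up over that order in reverse, and the fl-bitmask/mch loop is replaced by a closed-form correction (add min|t-f| unless some child ties or the strict minima go both ways).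
-- outside the precondition, e.g. on equalitree([3, 7, 1], [1, 0, 1]): A raises IndexError, B raises IndexError; on equalitree([0, 2, 1], [1]): A returns 0, B returns 0
import Mathlib
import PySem

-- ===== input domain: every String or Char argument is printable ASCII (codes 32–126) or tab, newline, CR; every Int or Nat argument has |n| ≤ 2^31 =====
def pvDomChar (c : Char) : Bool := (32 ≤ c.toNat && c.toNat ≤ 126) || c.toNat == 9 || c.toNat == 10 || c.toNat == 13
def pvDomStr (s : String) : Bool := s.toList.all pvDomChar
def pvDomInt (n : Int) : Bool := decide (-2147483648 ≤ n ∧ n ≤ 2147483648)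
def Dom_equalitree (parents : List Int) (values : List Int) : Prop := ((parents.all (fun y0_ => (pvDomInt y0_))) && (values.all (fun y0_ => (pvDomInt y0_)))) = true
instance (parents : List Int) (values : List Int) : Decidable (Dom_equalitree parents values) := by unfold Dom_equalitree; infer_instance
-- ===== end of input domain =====

-- B replaces A's memoized recursion by an explicit BFS that lists the nodes reachable
-- from the root in topological order and a bottom-up dp-table fill over that order in
-- reverse, with the fl-bitmask/mch loop replaced by a closed-form correction; return
-- values are identical on every input of Pre_.

def pvInf : Int := 10 ^ 9

-- ===== PORT A =====
-- children[parents[i]] += [i]  (Python negative indices wrap; an out-of-range index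
-- raises in Python and is excluded by Pre_, the port then leaves the list unchanged)
def pvChildren (parents : List Int) : List (List Nat) :=
  (List.range' 1 (parents.length - 1)).foldl
    (fun ch i =>
      let p := parents.getD i 0
      let q : Int := if p < 0 then p + (parents.length : Int) else p
      if 0 ≤ q ∧ q.toNat < ch.length then ch.set q.toNat (ch.getD q.toNat [] ++ [i]) else ch)
    (List.replicate parents.length [])

-- the body of A's tf for one node, given the (t, f) pairs of its children in order
def pvNodeA (v : Int) (kids : List (Int × Int)) : Int × Int :=
  match kids with
  | [] => if v ≠ 0 then (0, 1) else (1, 0)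
  | [k] => (1 - v + min k.1 k.2, pvInf)
  | _ =>
    let t := min (kids.map Prod.fst).sum (kids.map Prod.snd).sum + 1 - v
    let s := kids.foldl
      (fun (acc : Int × Nat × Int) k =>
        if k.1 < k.2 then (acc.1 + k.1, acc.2.1 ||| 1, min acc.2.2 |k.1 - k.2|)
        else if k.2 < k.1 then (acc.1 + k.2, acc.2.1 ||| 2, min acc.2.2 |k.1 - k.2|)
        else (acc.1 + k.2, acc.2.1 ||| 3, min acc.2.2 |k.1 - k.2|))
      (v, 0, pvInf)
    (t, if s.2.1 ≠ 3 then s.1 + s.2.2 else s.1)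

-- A's memo caches pure results; the port is the same recursion with fuel (on Pre_ the
-- recursion depth is at most the number of nodes, so fuel n suffices — proved below)
def pvTfA (children : List (List Nat)) (values : List Int) : Nat → Nat → Int × Int
  | 0, _ => (0, 0)
  | fuel + 1, r =>
    pvNodeA (values.getD r 0) ((children.getD r []).map (fun c => pvTfA children values fuel c))

def equalitree (parents : List Int) (values : List Int) : Int :=
  let p := pvTfA (pvChildren parents) values parents.length 0
  min p.1 p.2

-- ===== PORT B =====
-- the body of B's _node for one node, given the (t, f) pairs of its children in order
def pvNodeB (v : Int) (kids : List (Int × Int)) : Int × Int :=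
  match kids with
  | [] => if v ≠ 0 then (0, 1) else (1, 0)
  | [k] => (1 - v + min k.1 k.2, pvInf)
  | _ =>
    let t := min (kids.map Prod.fst).sum (kids.map Prod.snd).sum + 1 - v
    let f := v + (kids.map (fun k => min k.1 k.2)).sum
    (t, if kids.any (fun k => k.1 == k.2) ||
           (kids.any (fun k => decide (k.1 < k.2)) && kids.any (fun k => decide (k.2 < k.1)))
        then f
        else f + (kids.map (fun k => |k.1 - k.2|)).foldl min pvInf)

-- B's `while i < len(order): order.extend(children[order[i]]); i += 1`, with fuel:
-- on Pre_ the loop runs at most n times (the order list is duplicate-free, proved below)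
def pvBfs (children : List (List Nat)) : Nat → List Nat → Nat → List Nat
  | 0, order, _ => order
  | fuel + 1, order, i =>
    if i < order.length then
      pvBfs children fuel (order ++ children.getD (order.getD i 0) []) (i + 1)
    else order

def equalitree_alt (parents : List Int) (values : List Int) : Int :=
  let n := parents.length
  let children := pvChildren parents
  let order := pvBfs children n [0] 0
  let dp := order.reverse.foldl
    (fun dp r => dp.set r (pvNodeB (values.getD r 0)
        ((children.getD r []).map (fun c => dp.getD c (0, 0)))))
    (List.replicate n ((0 : Int), (0 : Int)))
  min (dp.getD 0 (0, 0)).1 (dp.getD 0 (0, 0)).2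

-- ===== PRECONDITION & SPEC =====
-- Pre_ excludes exactly the inputs on which A raises: parents = [] (tf(0) hits an empty
-- children table, IndexError), a parent index out of range after Python's negative-index
-- wraparound (IndexError), and values shorter than parents, on which A raises IndexError
-- whenever a node reachable from the root has no value (when every uncovered node is
-- unreachable junk A happens to return, and B returns the same value there — see cites).
def Pre_equalitree (parents : List Int) (values : List Int) : Prop :=
  parents ≠ [] ∧ parents.length ≤ values.length ∧
  ∀ i : Nat, i < parents.length → 1 ≤ i →
    (0 ≤ (if parents.getD i 0 < 0 then parents.getD i 0 + (parents.length : Int) else parents.getD i 0) ∧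
     (if parents.getD i 0 < 0 then parents.getD i 0 + (parents.length : Int) else parents.getD i 0) < (parents.length : Int))
instance (parents : List Int) (values : List Int) : Decidable (Pre_equalitree parents values) := by
  unfold Pre_equalitree; infer_instance

def pvWitness_equalitree : List Int × List Int := ([0, 3, 0, 0], [1, 0, 1, 0])

def Spec_equalitree (parents : List Int) (values : List Int) (out : Int) : Prop := out = equalitree_alt parents values
instance (parents : List Int) (values : List Int) (out : Int) : Decidable (Spec_equalitree parents values out) := by unfold Spec_equalitree; infer_instance

-- ===== CLAIM (what is proved, stated in full; the proofs are below) =====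
def Claim_equal_equalitree : Prop := ∀ (parents : List Int) (values : List Int), Dom_equalitree parents values → Pre_equalitree parents values → Spec_equalitree parents values (equalitree parents values)

-- ===== LEMMAS AND PROOFS =====

-- proofs-only helper: the value of A's fl bitmask over a list of (t, f) pairs
def pvFl (kids : List (Int × Int)) : Nat :=
  (if kids.any (fun k => decide (k.1 ≤ k.2)) = true then 1 else 0) +
  (if kids.any (fun k => decide (k.2 ≤ k.1)) = true then 2 else 0)

theorem pvFl_cons (k : Int × Int) (ks : List (Int × Int)) :
    pvFl (k :: ks) =
      ((if k.1 < k.2 then 1 else if k.2 < k.1 then 2 else 3) ||| pvFl ks) := by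
  unfold pvFl
  rcases lt_trichotomy k.1 k.2 with h | h | h
  · have e1 : (decide (k.1 ≤ k.2)) = true := decide_eq_true (le_of_lt h)
    have e2 : (decide (k.2 ≤ k.1)) = false := decide_eq_false (not_le.mpr h)
    rw [if_pos h]
    cases ha : ks.any (fun k => decide (k.1 ≤ k.2)) <;>
      cases hb : ks.any (fun k => decide (k.2 ≤ k.1)) <;>
      simp [List.any_cons, e1, e2, ha, hb]
  · have e1 : (decide (k.1 ≤ k.2)) = true := decide_eq_true (le_of_eq h)
    have e2 : (decide (k.2 ≤ k.1)) = true := decide_eq_true (le_of_eq h.symm)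
    rw [if_neg (show ¬ (k.1 < k.2) by omega), if_neg (show ¬ (k.2 < k.1) by omega)]
    cases ha : ks.any (fun k => decide (k.1 ≤ k.2)) <;>
      cases hb : ks.any (fun k => decide (k.2 ≤ k.1)) <;>
      simp [List.any_cons, e1, e2, ha, hb]
  · have e1 : (decide (k.1 ≤ k.2)) = false := decide_eq_false (not_le.mpr h)
    have e2 : (decide (k.2 ≤ k.1)) = true := decide_eq_true (le_of_lt h)
    rw [if_neg (show ¬ (k.1 < k.2) by omega), if_pos h]
    cases ha : ks.any (fun k => decide (k.1 ≤ k.2)) <;>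
      cases hb : ks.any (fun k => decide (k.2 ≤ k.1)) <;>
      simp [List.any_cons, e1, e2, ha, hb]

theorem foldA_char (kids : List (Int × Int)) : ∀ (f₀ : Int) (fl₀ : Nat) (m₀ : Int),
    kids.foldl
      (fun (acc : Int × Nat × Int) k =>
        if k.1 < k.2 then (acc.1 + k.1, acc.2.1 ||| 1, min acc.2.2 |k.1 - k.2|)
        else if k.2 < k.1 then (acc.1 + k.2, acc.2.1 ||| 2, min acc.2.2 |k.1 - k.2|)
        else (acc.1 + k.2, acc.2.1 ||| 3, min acc.2.2 |k.1 - k.2|))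
      (f₀, fl₀, m₀) =
    (f₀ + (kids.map (fun k => min k.1 k.2)).sum,
     fl₀ ||| pvFl kids,
     (kids.map (fun k => |k.1 - k.2|)).foldl min m₀) := by
  induction kids with
  | nil => intro f₀ fl₀ m₀; simp [pvFl]
  | cons k ks ih =>
    intro f₀ fl₀ m₀
    simp only [List.foldl_cons, List.map_cons, List.sum_cons, pvFl_cons]
    rcases lt_trichotomy k.1 k.2 with h | h | h
    · simp only [if_pos h, ih]
      refine Prod.ext ?_ (Prod.ext ?_ ?_)
      · simp only; rw [min_eq_left (le_of_lt h)]; ring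
      · simp only [Nat.or_assoc]
      · simp only
    · simp only [if_neg (show ¬ (k.1 < k.2) by omega), if_neg (show ¬ (k.2 < k.1) by omega), ih]
      refine Prod.ext ?_ (Prod.ext ?_ ?_)
      · simp only; rw [min_eq_right (le_of_eq h.symm)]; ring
      · simp only [Nat.or_assoc]
      · simp only
    · simp only [if_neg (show ¬ (k.1 < k.2) by omega), if_pos h, ih]
      refine Prod.ext ?_ (Prod.ext ?_ ?_)
      · simp only; rw [min_eq_right (le_of_lt h)]; ring
      · simp only [Nat.or_assoc]
      · simp only

theorem anys_iff (kids : List (Int × Int)) :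
    ((kids.any (fun k => decide (k.1 ≤ k.2)) = true) ∧ (kids.any (fun k => decide (k.2 ≤ k.1)) = true)) ↔
      (kids.any (fun k => k.1 == k.2) ||
        (kids.any (fun k => decide (k.1 < k.2)) && kids.any (fun k => decide (k.2 < k.1)))) = true := by
  simp only [List.any_eq_true, decide_eq_true_eq, Bool.or_eq_true, Bool.and_eq_true, beq_iff_eq]
  constructor
  · rintro ⟨⟨k, hk, h1⟩, ⟨k', hk', h2⟩⟩
    by_cases e : k.1 = k.2
    · exact Or.inl ⟨k, hk, e⟩
    by_cases e' : k'.1 = k'.2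
    · exact Or.inl ⟨k', hk', e'⟩
    · exact Or.inr ⟨⟨k, hk, lt_of_le_of_ne h1 e⟩, ⟨k', hk', lt_of_le_of_ne h2 (fun hh => e' hh.symm)⟩⟩
  · rintro (⟨k, hk, e⟩ | ⟨⟨k, hk, h1⟩, ⟨k', hk', h2⟩⟩)
    · exact ⟨⟨k, hk, le_of_eq e⟩, ⟨k, hk, le_of_eq e.symm⟩⟩
    · exact ⟨⟨k, hk, le_of_lt h1⟩, ⟨k', hk', le_of_lt h2⟩⟩

theorem pvFl_eq_three (kids : List (Int × Int)) :
    (pvFl kids = 3) ↔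
      (kids.any (fun k => k.1 == k.2) ||
        (kids.any (fun k => decide (k.1 < k.2)) && kids.any (fun k => decide (k.2 < k.1)))) = true := by
  rw [← anys_iff]
  unfold pvFl
  cases ha : (kids.any fun k => decide (k.1 ≤ k.2)) <;>
    cases hb : (kids.any fun k => decide (k.2 ≤ k.1)) <;>
    simp

theorem node_eq (v : Int) (kids : List (Int × Int)) : pvNodeA v kids = pvNodeB v kids := by
  match kids with
  | [] => rfl
  | [k] => rfl
  | k1 :: k2 :: ks =>
    unfold pvNodeA pvNodeB
    rw [foldA_char]
    simp only [Nat.zero_or]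
    refine Prod.ext rfl ?_
    by_cases h3 : pvFl (k1 :: k2 :: ks) = 3
    · rw [if_neg (by simpa using h3), if_pos ((pvFl_eq_three _).mp h3)]
    · rw [if_pos (by simpa using h3)]
      rw [if_neg (fun hc => h3 ((pvFl_eq_three _).mpr hc))]

-- proofs-only helper: the (wrapped) parent of node i as a Nat
def pvPstep (parents : List Int) (i : Nat) : Nat :=
  (if parents.getD i 0 < 0 then parents.getD i 0 + (parents.length : Int) else parents.getD i 0).toNat

theorem children_fold (parents : List Int)
    (hp : ∀ i : Nat, i < parents.length → 1 ≤ i →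
      (0 ≤ (if parents.getD i 0 < 0 then parents.getD i 0 + (parents.length : Int) else parents.getD i 0) ∧
       (if parents.getD i 0 < 0 then parents.getD i 0 + (parents.length : Int) else parents.getD i 0) < (parents.length : Int))) :
    ∀ (l : List Nat), (∀ c ∈ l, 1 ≤ c ∧ c < parents.length) →
    ∀ (ch : List (List Nat)), ch.length = parents.length →
    (l.foldl
        (fun ch i =>
          let p := parents.getD i 0
          let q : Int := if p < 0 then p + (parents.length : Int) else p
          if 0 ≤ q ∧ q.toNat < ch.length then ch.set q.toNat (ch.getD q.toNat [] ++ [i]) else ch)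
        ch).length = parents.length ∧
    ∀ j, (l.foldl
        (fun ch i =>
          let p := parents.getD i 0
          let q : Int := if p < 0 then p + (parents.length : Int) else p
          if 0 ≤ q ∧ q.toNat < ch.length then ch.set q.toNat (ch.getD q.toNat [] ++ [i]) else ch)
        ch).getD j [] = ch.getD j [] ++ l.filter (fun c => pvPstep parents c == j) := by
  intro l
  induction l with
  | nil => intro _ ch hlen; exact ⟨hlen, fun j => by simp⟩
  | cons i l ih =>
    intro hl ch hlen
    obtain ⟨hi1, hilt⟩ := hl i List.mem_cons_self
    obtain ⟨hq0, hqn⟩ := hp i hilt hi1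
    have hqt : (if parents.getD i 0 < 0 then parents.getD i 0 + (parents.length : Int) else parents.getD i 0).toNat = pvPstep parents i := rfl
    have hlt : pvPstep parents i < parents.length := by
      unfold pvPstep; omega
    have hguard : (0 ≤ (if parents.getD i 0 < 0 then parents.getD i 0 + (parents.length : Int) else parents.getD i 0) ∧
        (if parents.getD i 0 < 0 then parents.getD i 0 + (parents.length : Int) else parents.getD i 0).toNat < ch.length) :=
      ⟨hq0, by rw [hqt, hlen]; exact hlt⟩
    simp only [List.foldl_cons]
    rw [if_pos hguard, hqt]
    set ch' := ch.set (pvPstep parents i) (ch.getD (pvPstep parents i) [] ++ [i]) with hch'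
    have hlen' : ch'.length = parents.length := by simp [hch', hlen]
    obtain ⟨hL, hG⟩ := ih (fun c hc => hl c (List.mem_cons_of_mem _ hc)) ch' hlen'
    refine ⟨hL, fun j => ?_⟩
    rw [hG j]
    by_cases hj : j = pvPstep parents i
    · subst hj
      have : ch'.getD (pvPstep parents i) [] = ch.getD (pvPstep parents i) [] ++ [i] := by
        rw [hch', List.getD_eq_getElem?_getD, List.getElem?_set_self (by omega), Option.getD_some]
      rw [this, List.filter_cons]
      simp only [beq_self_eq_true, if_pos]
      rw [List.append_assoc, List.singleton_append]
    · have hne : (pvPstep parents i == j) = false := by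
        exact beq_eq_false_iff_ne.mpr (fun h => hj (Eq.symm h))
      have : ch'.getD j [] = ch.getD j [] := by
        rw [hch', List.getD_eq_getElem?_getD, List.getElem?_set_ne (fun hh => hj hh.symm),
          ← List.getD_eq_getElem?_getD]
      rw [this, List.filter_cons, hne]
      simp

-- the children table under Pre_: list j holds exactly the i ∈ [1, n) with wrapped parent j
theorem children_char (parents values : List Int) (hpre : Pre_equalitree parents values) :
    (pvChildren parents).length = parents.length ∧
    ∀ j, (pvChildren parents).getD j [] =
      (List.range' 1 (parents.length - 1)).filter (fun c => pvPstep parents c == j) := by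
  obtain ⟨hne, _, hp⟩ := hpre
  have hn : 1 ≤ parents.length := List.length_pos_iff.mpr hne
  have hr : ∀ c ∈ List.range' 1 (parents.length - 1), 1 ≤ c ∧ c < parents.length := by
    intro c hc; have := List.mem_range'_1.mp hc; omega
  obtain ⟨hL, hG⟩ := children_fold parents hp (List.range' 1 (parents.length - 1)) hr
    (List.replicate parents.length []) (by simp)
  constructor
  · exact hL
  · intro j
    show (pvChildren parents).getD j [] = _
    unfold pvChildren
    rw [hG j]
    rcases Nat.lt_or_ge j parents.length with hj | hj
    · simp [List.getD_eq_getElem?_getD, hj]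
    · rw [List.getD_eq_getElem?_getD, List.getElem?_eq_none (by simpa using hj)]
      simp

-- the three facts about the children table the BFS and dp proofs use
theorem children_facts (parents values : List Int) (hpre : Pre_equalitree parents values) :
    (∀ j c, c ∈ (pvChildren parents).getD j [] → 1 ≤ c ∧ c < parents.length) ∧
    (∀ j j' c, c ∈ (pvChildren parents).getD j [] → c ∈ (pvChildren parents).getD j' [] → j = j') ∧
    (∀ j, ((pvChildren parents).getD j []).Nodup) := by
  obtain ⟨_, hG⟩ := children_char parents values hpre
  have hn : 1 ≤ parents.length := List.length_pos_iff.mpr hpre.1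
  refine ⟨?_, ?_, ?_⟩
  · intro j c hc
    rw [hG j] at hc
    have := List.mem_range'_1.mp (List.mem_filter.mp hc).1
    omega
  · intro j j' c hc hc'
    rw [hG j] at hc; rw [hG j'] at hc'
    have h1 := beq_iff_eq.mp (List.mem_filter.mp hc).2
    have h2 := beq_iff_eq.mp (List.mem_filter.mp hc').2
    omega
  · intro j
    rw [hG j]
    exact (List.nodup_range' ..).filter _

-- a duplicate-free list of naturals below n has length at most n
theorem nodup_length_le (n : Nat) (l : List Nat) (hnd : l.Nodup) (hb : ∀ x ∈ l, x < n) :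
    l.length ≤ n := by
  have h1 : l.toFinset.card = l.length := List.toFinset_card_of_nodup hnd
  have h2 : l.toFinset ⊆ Finset.range n := by
    intro x hx
    exact Finset.mem_range.mpr (hb x (List.mem_toFinset.mp hx))
  have := Finset.card_le_card h2
  rw [h1, Finset.card_range] at this
  omega

-- proofs-only: the BFS loop invariant
def pvInv (n : Nat) (ch : List (List Nat)) (order : List Nat) (i : Nat) : Prop :=
  order ≠ [] ∧ i ≤ order.length ∧ order.Nodup ∧ (∀ x ∈ order, x < n) ∧
  order.getD 0 0 = 0 ∧
  (∀ c ∈ order, c ≠ 0 → ∃ j, j < i ∧ c ∈ ch.getD (order.getD j 0) []) ∧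
  (∀ j, j < i → ∀ c ∈ ch.getD (order.getD j 0) [],
    ∃ j', j < j' ∧ j' < order.length ∧ order.getD j' 0 = c)

theorem bfs_spec (n : Nat) (ch : List (List Nat))
    (hK1 : ∀ j c, c ∈ ch.getD j [] → 1 ≤ c ∧ c < n)
    (hK2 : ∀ j j' c, c ∈ ch.getD j [] → c ∈ ch.getD j' [] → j = j')
    (hK3 : ∀ j, (ch.getD j []).Nodup) :
    ∀ (fuel : Nat) (order : List Nat) (i : Nat), pvInv n ch order i → n - i ≤ fuel →
    ∃ t, pvBfs ch fuel order i = order ++ t ∧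
      pvInv n ch (order ++ t) (order ++ t).length := by
  intro fuel
  induction fuel with
  | zero =>
    intro order i hinv hfuel
    obtain ⟨hne, hile, hnd, hb, h0, hpre, hpost⟩ := hinv
    have hlen : order.length ≤ n := nodup_length_le n order hnd hb
    have : i = order.length := by omega
    subst this
    exact ⟨[], by simp [pvBfs], by simpa using ⟨hne, le_rfl, hnd, hb, h0, hpre, hpost⟩⟩
  | succ fuel ih =>
    intro order i hinv hfuel
    obtain ⟨hne, hile, hnd, hb, h0, hpre, hpost⟩ := hinv
    show ∃ t, pvBfs ch (fuel + 1) order i = order ++ t ∧ _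
    rw [pvBfs]
    by_cases hguard : i < order.length
    · rw [if_pos hguard]
      set r := order.getD i 0 with hr
      have hrmem : r ∈ order := by
        rw [hr, List.getD_eq_getElem?_getD, List.getElem?_eq_getElem hguard]
        exact List.mem_of_getElem rfl
      -- the appended children are new: none of them is already in order
      have hdisj : ∀ c ∈ ch.getD r [], c ∉ order := by
        intro c hc hcin
        have hc1 := hK1 r c hc
        obtain ⟨j, hj, hjc⟩ := hpre c hcin (by omega)
        have hjlt : j < order.length := by omega
        have heq : order.getD j 0 = r := hK2 _ _ _ hjc hc
        have : j = i := by
          have e1 : order[j]'hjlt = order[i]'hguard := by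
            have a1 : order.getD j 0 = order[j]'hjlt := by
              rw [List.getD_eq_getElem?_getD, List.getElem?_eq_getElem hjlt]; rfl
            have a2 : order.getD i 0 = order[i]'hguard := by
              rw [List.getD_eq_getElem?_getD, List.getElem?_eq_getElem hguard]; rfl
            rw [← a1, ← a2, heq, hr]
          exact (List.Nodup.getElem_inj_iff hnd).mp e1
        omega
      set order' := order ++ ch.getD r [] with horder'
      have hgetDpres : ∀ j, j < order.length → order'.getD j 0 = order.getD j 0 := by
        intro j hj
        rw [horder', List.getD_eq_getElem?_getD, List.getElem?_append_left hj,
          ← List.getD_eq_getElem?_getD]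
      have hinv' : pvInv n ch order' (i + 1) := by
        refine ⟨by simp [horder', hne], by simp [horder']; omega, ?_, ?_, ?_, ?_, ?_⟩
        · rw [horder', List.nodup_append]
          refine ⟨hnd, hK3 r, ?_⟩
          intro a ha b hb heq
          exact hdisj a (heq ▸ hb) ha
        · intro x hx
          rcases List.mem_append.mp hx with h | h
          · exact hb x h
          · exact (hK1 r x h).2
        · rw [hgetDpres 0 (by omega)]; exact h0
        · intro c hc hc0
          rcases List.mem_append.mp hc with h | h
          · obtain ⟨j, hj, hjc⟩ := hpre c h hc0
            exact ⟨j, by omega, by rwa [hgetDpres j (by omega)]⟩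
          · exact ⟨i, by omega, by rwa [hgetDpres i hguard]⟩
        · intro j hj c hc
          by_cases hji : j = i
          · subst hji
            rw [hgetDpres j hguard, ← hr] at hc
            obtain ⟨k, hk, hkc⟩ := List.getElem_of_mem hc
            refine ⟨order.length + k, by omega, ?_, ?_⟩
            · rw [horder', List.length_append]; omega
            · rw [horder', List.getD_eq_getElem?_getD,
                List.getElem?_append_right (by omega)]
              simp only [Nat.add_sub_cancel_left]
              rw [List.getElem?_eq_getElem hk]
              exact hkc
          · have hji' : j < i := by omega
            rw [hgetDpres j (by omega)] at hc
            obtain ⟨j', hjj', hj'lt, hj'c⟩ := hpost j hji' c hc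
            exact ⟨j', hjj', by rw [horder', List.length_append]; omega, by rwa [hgetDpres j' hj'lt]⟩
      obtain ⟨t, ht, hinvf⟩ := ih order' (i + 1) hinv' (by omega)
      exact ⟨ch.getD r [] ++ t, by rw [← List.append_assoc, ← horder']; exact ⟨ht, hinvf⟩⟩
    · rw [if_neg hguard]
      have : i = order.length := by omega
      subst this
      exact ⟨[], by simp, by simpa using ⟨hne, le_rfl, hnd, hb, h0, hpre, hpost⟩⟩

-- fuel-independence of A's tf on nodes of the BFS order (children sit at later positions)
theorem tfA_mono (ch : List (List Nat)) (values : List Int) (ord : List Nat)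
    (hpost : ∀ j, j < ord.length → ∀ c ∈ ch.getD (ord.getD j 0) [],
      ∃ j', j < j' ∧ j' < ord.length ∧ ord.getD j' 0 = c) :
    ∀ (fuel fuel' j : Nat), j < ord.length → ord.length - j ≤ fuel → ord.length - j ≤ fuel' →
      pvTfA ch values fuel (ord.getD j 0) = pvTfA ch values fuel' (ord.getD j 0) := by
  intro fuel
  induction fuel with
  | zero => intro fuel' j hj h1 h2; omega
  | succ a ih =>
    intro fuel' j hj h1 h2
    obtain ⟨b, rfl⟩ : ∃ b, fuel' = b + 1 := ⟨fuel' - 1, by omega⟩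
    show pvNodeA _ _ = pvNodeA _ _
    congr 1
    refine List.map_congr_left ?_
    intro c hc
    obtain ⟨j', hjj', hj'lt, hj'c⟩ := hpost j hj c hc
    rw [← hj'c]
    exact ih b j' hj'lt (by omega) (by omega)

-- the dp fill over the reversed BFS order computes A's tf at every node of the order
theorem dp_fill (n : Nat) (ch : List (List Nat)) (values : List Int) (ord : List Nat)
    (hn1 : 1 ≤ n)
    (hb : ∀ x ∈ ord, x < n) (hnd : ord.Nodup)
    (hpost : ∀ j, j < ord.length → ∀ c ∈ ch.getD (ord.getD j 0) [],
      ∃ j', j < j' ∧ j' < ord.length ∧ ord.getD j' 0 = c) :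
    ∀ (m k : Nat), k + m = ord.length →
      ((ord.drop k).reverse.foldl
        (fun dp r => dp.set r (pvNodeB (values.getD r 0)
            ((ch.getD r []).map (fun c => dp.getD c (0, 0)))))
        (List.replicate n ((0 : Int), (0 : Int)))).length = n ∧
      ∀ j, k ≤ j → j < ord.length →
        ((ord.drop k).reverse.foldl
          (fun dp r => dp.set r (pvNodeB (values.getD r 0)
              ((ch.getD r []).map (fun c => dp.getD c (0, 0)))))
          (List.replicate n ((0 : Int), (0 : Int)))).getD (ord.getD j 0) (0, 0)
          = pvTfA ch values n (ord.getD j 0) := by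
  have hLn : ord.length ≤ n := nodup_length_le n ord hnd hb
  intro m
  induction m with
  | zero =>
    intro k hk
    have hkl : k = ord.length := by omega
    subst hkl
    constructor
    · rw [List.drop_length]; simp
    · intro j hj hjlt; omega
  | succ m ih =>
    intro k hk
    have hklt : k < ord.length := by omega
    have hdrop : ord.drop k = ord.getD k 0 :: ord.drop (k + 1) := by
      rw [List.getD_eq_getElem?_getD, List.getElem?_eq_getElem hklt]
      exact List.drop_eq_getElem_cons hklt
    obtain ⟨ihL, ihG⟩ := ih (k + 1) (by omega)
    rw [hdrop, List.reverse_cons, List.foldl_append, List.foldl_cons, List.foldl_nil]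
    set D := ((ord.drop (k + 1)).reverse.foldl
        (fun dp r => dp.set r (pvNodeB (values.getD r 0)
            ((ch.getD r []).map (fun c => dp.getD c (0, 0)))))
        (List.replicate n ((0 : Int), (0 : Int)))) with hD
    set r := ord.getD k 0 with hr
    have hrn : r < n := by
      apply hb
      rw [hr, List.getD_eq_getElem?_getD, List.getElem?_eq_getElem hklt]
      exact List.mem_of_getElem rfl
    constructor
    · simp [ihL]
    · intro j hj hjlt
      by_cases hjk : j = k
      · subst hjk
        rw [← hr, List.getD_eq_getElem?_getD, List.getElem?_set_self (by omega), Option.getD_some]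
        have hstep : pvTfA ch values n r =
            pvNodeA (values.getD r 0) ((ch.getD r []).map (fun c => pvTfA ch values (n - 1) c)) := by
          have hnn : n = (n - 1) + 1 := by omega
          rw [hnn]; rfl
        rw [hstep, node_eq]
        congr 1
        refine List.map_congr_left ?_
        intro c hc
        obtain ⟨j', hjj', hj'lt, hj'c⟩ := hpost j hjlt c (by rwa [hr] at hc)
        rw [← hj'c, ihG j' (by omega) hj'lt]
        exact tfA_mono ch values ord hpost n (n - 1) j' hj'lt (by omega) (by omega)
      · have hne : ord.getD j 0 ≠ r := by
          intro he
          have hjl : j < ord.length := hjlt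
          have e1 : ord[j]'hjl = ord[k]'hklt := by
            have a1 : ord.getD j 0 = ord[j]'hjl := by
              rw [List.getD_eq_getElem?_getD, List.getElem?_eq_getElem hjl]; rfl
            have a2 : ord.getD k 0 = ord[k]'hklt := by
              rw [List.getD_eq_getElem?_getD, List.getElem?_eq_getElem hklt]; rfl
            rw [← a1, ← a2, he, hr]
          exact hjk ((List.Nodup.getElem_inj_iff hnd).mp e1)
        rw [List.getD_eq_getElem?_getD, List.getElem?_set_ne (fun hh => hne hh.symm),
          ← List.getD_eq_getElem?_getD]
        exact ihG j (by omega) hjlt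

-- ===== VERDICT (by name: the statement is the Claim_ definition above) =====
theorem equalitree_spec : Claim_equal_equalitree := by
  intro parents values _ hpre
  obtain ⟨hK1, hK2, hK3⟩ := children_facts parents values hpre
  have hn : 1 ≤ parents.length := List.length_pos_iff.mpr hpre.1
  have hinv0 : pvInv parents.length (pvChildren parents) [0] 0 := by
    refine ⟨by simp, by simp, by simp, ?_, by simp, ?_, ?_⟩
    · intro x hx; simp at hx; omega
    · intro c hc hc0; simp at hc; omega
    · intro j hj; omega
  obtain ⟨t, ht, hinvf⟩ := bfs_spec parents.length (pvChildren parents) hK1 hK2 hK3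
    parents.length [0] 0 hinv0 (by omega)
  obtain ⟨hne, _, hnodup, hb, h0, _, hpost⟩ := hinvf
  have hlen1 : 0 < ([0] ++ t : List Nat).length := by simp
  obtain ⟨_, hG⟩ := dp_fill parents.length (pvChildren parents) values ([0] ++ t) hn hb hnodup
    hpost ([0] ++ t : List Nat).length 0 (by omega)
  simp only [List.drop_zero] at hG
  have h00 : ([0] ++ t : List Nat).getD 0 0 = 0 := by simp
  have hval := hG 0 (by omega) hlen1
  rw [h00] at hval
  show min (pvTfA (pvChildren parents) values parents.length 0).1
        (pvTfA (pvChildren parents) values parents.length 0).2 =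
      min (((pvBfs (pvChildren parents) parents.length [0] 0).reverse.foldl
            (fun dp r => dp.set r (pvNodeB (values.getD r 0)
                (((pvChildren parents).getD r []).map (fun c => dp.getD c (0, 0)))))
            (List.replicate parents.length ((0 : Int), (0 : Int)))).getD 0 (0, 0)).1
        (((pvBfs (pvChildren parents) parents.length [0] 0).reverse.foldl
            (fun dp r => dp.set r (pvNodeB (values.getD r 0)
                (((pvChildren parents).getD r []).map (fun c => dp.getD c (0, 0)))))
            (List.replicate parents.length ((0 : Int), (0 : Int)))).getD 0 (0, 0)).2
  rw [ht, hval]
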